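-- pv_equiv track=rewrite | github.com/aksmf1442/Algorithm-repository | BAEKJOON/구현/문자열 압축.py | solution
-- ===== SOURCE A (Python) =====
-- def solution(s):
--     answer = len(s)
--     mid = len(s) // 2
--
--     for i in range(1, mid + 1):
--         candidate = ""
--         value = s[0:i]
--         count = 1
--
--         for j in range(0, len(s), i):
--             if s[j:j + i] == s[j + i:j + (2 * i)]:
--                 value = s[j:j + i]
--                 count += 1
--             else:
--                 if count != 1:
--                     candidate += str(count)
--                 candidate += value
--                 value = s[j + i:j + (2 * i)]
--                 count = 1
--
--         if value:
--             candidate += (str(count) + value)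
--         answer = min(answer, len(candidate))
--
--     return answer
-- ===== SOURCE B (Python) =====
-- def solution(s):
--     n = len(s)
--     best = n
--     for i in range(1, n // 2 + 1):
--         # positions where a new run of i-chunks must start (chunk differs from its predecessor)
--         cuts = [j for j in range(i, n, i) if s[j - i:j] != s[j:j + i]]
--         total = 0
--         for a, b in zip([0] + cuts, cuts + [n]):
--             c = (b - a + i - 1) // i
--             total += min(i, n - a) + (len(str(c)) if c > 1 else 0)
--         best = min(best, total)
--     return best
-- ===== Notes on version B (the rewrite author's own statement) =====
-- stated objective: alternative
-- what changed: B never simulates A's running run-length encoder: per chunk size it first materialises the list of cut positions (chunk starts whose chunk differs from its predecessor), then zips consecutive cut positions into (start,end) run intervals and computes the compressed length purely arithmetically from the interval bounds (ceil-divided run count, min(i, n-start) representative length), instead of A's single lookahead pass that concatenates a candidate string and measures it.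
import Mathlib
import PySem

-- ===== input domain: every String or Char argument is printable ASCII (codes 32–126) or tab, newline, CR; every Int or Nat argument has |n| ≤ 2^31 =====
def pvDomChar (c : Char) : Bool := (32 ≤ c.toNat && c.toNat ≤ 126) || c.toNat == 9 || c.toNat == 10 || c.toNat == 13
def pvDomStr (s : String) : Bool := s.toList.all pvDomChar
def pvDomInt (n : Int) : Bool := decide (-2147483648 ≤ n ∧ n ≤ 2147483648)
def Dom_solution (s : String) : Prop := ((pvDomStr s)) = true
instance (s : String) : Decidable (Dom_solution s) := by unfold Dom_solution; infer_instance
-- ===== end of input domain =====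

-- B replaces A's running run-length encoder (lookahead comparison + candidate-string
-- concatenation) by a staged computation: per chunk size it first lists the cut positions
-- where a chunk differs from its predecessor, then derives the compressed length
-- arithmetically from consecutive cut-position intervals; same asymptotic cost.

-- ===== PORT A =====
-- loop body of A's inner `for j in range(0, len(s), i)`; state = (candidate, value, count)
def bodyA (cs : List Char) (i : Int) (st : List Char × List Char × Int) (j : Int) :
    List Char × List Char × Int :=
  if PySem.List.slice cs (some j) (some (j + i)) =
      PySem.List.slice cs (some (j + i)) (some (j + 2 * i)) then
    (st.1, PySem.List.slice cs (some j) (some (j + i)), st.2.2 + 1)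
  else
    (st.1 ++ (if st.2.2 ≠ 1 then PySem.Int.toChars st.2.2 else []) ++ st.2.1,
     PySem.List.slice cs (some (j + i)) (some (j + 2 * i)), 1)

def solution (s : String) : Int :=
  let cs := s.toList
  let n : Int := (cs.length : Int)
  let mid := PySem.Int.floordiv n 2
  (PySem.List.pyRange 1 (mid + 1) 1).foldl
    (fun answer i =>
      let st := (PySem.List.pyRange 0 n i).foldl (bodyA cs i)
        ([], PySem.List.slice cs (some 0) (some i), 1)
      let candidate := if st.2.1 ≠ [] then st.1 ++ PySem.Int.toChars st.2.2 ++ st.2.1 else st.1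
      min answer (candidate.length : Int))
    n

-- ===== PORT B =====
def solution_alt (s : String) : Int :=
  let cs := s.toList
  let n : Int := (cs.length : Int)
  (PySem.List.pyRange 1 (PySem.Int.floordiv n 2 + 1) 1).foldl
    (fun best i =>
      -- cuts = [j for j in range(i, n, i) if s[j-i:j] != s[j:j+i]]
      let cuts := (PySem.List.pyRange i n i).filter
        (fun j => decide (PySem.List.slice cs (some (j - i)) (some j) ≠
                          PySem.List.slice cs (some j) (some (j + i))))
      -- for a, b in zip([0]+cuts, cuts+[n]): total += min(i, n-a) + (len(str(c)) if c>1 else 0)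
      let total := (List.zip ((0 : Int) :: cuts) (cuts ++ [n])).foldl
        (fun t ab =>
          let c := PySem.Int.floordiv (ab.2 - ab.1 + i - 1) i
          t + (min i (n - ab.1) +
            (if c > 1 then ((PySem.Int.toChars c).length : Int) else 0))) 0
      min best total)
    n

-- ===== PRECONDITION & SPEC =====
def Spec_solution (s : String) (out : Int) : Prop := out = solution_alt s
instance (s : String) (out : Int) : Decidable (Spec_solution s out) := by unfold Spec_solution; infer_instance

-- ===== CLAIM (what is proved, stated in full; the proofs are below) =====
def Claim_equal_solution : Prop := ∀ (s : String), Dom_solution s → Spec_solution s (solution s)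

-- ===== LEMMAS AND PROOFS =====

-- the chunk s[j:j+i]
def tokA (cs : List Char) (i j : Int) : List Char :=
  PySem.List.slice cs (some j) (some (j + i))

-- contribution of one run interval [a, b)
def contrib (i n a b : Int) : Int :=
  min i (n - a) +
    (if PySem.Int.floordiv (b - a + i - 1) i > 1
     then ((PySem.Int.toChars (PySem.Int.floordiv (b - a + i - 1) i)).length : Int) else 0)

-- B's zipped interval sum, written recursively over the cut list
def zipSum (i n : Int) : Int → List Int → Int
  | a, [] => contrib i n a n
  | a, b :: rest => contrib i n a b + zipSum i n b rest

-- cut positions strictly after chunk start j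
def cutsFrom (cs : List Char) (i j : Int) : List Int :=
  (PySem.List.pyRange (j + i) (cs.length : Int) i).filter
    (fun x => decide (tokA cs i (x - i) ≠ tokA cs i x))

lemma pyRange_pos_nil {a b i : Int} (hi : 0 < i) (h : b ≤ a) :
    PySem.List.pyRange a b i = [] := by
  rw [PySem.List.pyRange_of_pos _ _ hi, if_neg (by omega)]
  simp

lemma pyRange_pos_cons {a b i : Int} (hi : 0 < i) (h : a < b) :
    PySem.List.pyRange a b i = a :: PySem.List.pyRange (a + i) b i := by
  rw [PySem.List.pyRange_of_pos _ _ hi, PySem.List.pyRange_of_pos _ _ hi, if_pos h]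
  by_cases h2 : a + i < b
  · rw [if_pos h2]
    have hx : b - a + i - 1 = (b - (a + i) + i - 1) + 1 * i := by ring
    rw [hx, Int.add_mul_ediv_right _ _ (by omega : i ≠ 0)]
    have hnn : 0 ≤ (b - (a + i) + i - 1) / i := Int.ediv_nonneg (by omega) (by omega)
    rw [Int.toNat_add hnn (by norm_num)]
    simp only [Int.toNat_one]
    rw [List.range_succ_eq_map]
    simp only [List.map_cons, List.map_map, Nat.cast_zero, mul_zero, add_zero,
      List.cons.injEq, true_and]
    apply List.map_congr_left
    intro k _
    simp [Function.comp, Nat.succ_eq_add_one]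
    ring
  · rw [if_neg h2]
    have h1 : (b - a + i - 1) / i = 1 := by
      have hle : 1 * i ≤ b - a + i - 1 := by omega
      have hlt : b - a + i - 1 < (1 + 1) * i := by omega
      have hA : 1 ≤ (b - a + i - 1) / i := Int.le_ediv_iff_mul_le hi |>.mpr hle
      have hB : (b - a + i - 1) / i < 1 + 1 := Int.ediv_lt_iff_lt_mul hi |>.mpr hlt
      omega
    rw [h1]
    simp

lemma tok_nil {cs : List Char} {i a : Int} (hi : 0 < i) (ha : 0 ≤ a)
    (h : (cs.length : Int) ≤ a) : tokA cs i a = [] := by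
  rw [tokA, PySem.List.slice_toNat cs ha (show (0:Int) ≤ a + i by omega)]
  have : cs.length ≤ a.toNat := by omega
  simp [List.drop_eq_nil_of_le this]

lemma tok_ne_nil {cs : List Char} {i a : Int} (hi : 0 < i) (ha : 0 ≤ a)
    (h : a < (cs.length : Int)) : tokA cs i a ≠ [] := by
  apply List.ne_nil_of_length_pos
  rw [tokA, PySem.List.slice_toNat cs ha (show (0:Int) ≤ a + i by omega)]
  simp only [List.length_take, List.length_drop]
  omega

lemma tok_len {cs : List Char} {i j : Int} (hi : 0 < i) (h0 : 0 ≤ j)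
    (hn : j ≤ (cs.length : Int)) :
    ((tokA cs i j).length : Int) = min i ((cs.length : Int) - j) := by
  rw [tokA, PySem.List.slice_toNat cs h0 (show (0:Int) ≤ j + i by omega)]
  simp only [List.length_take, List.length_drop]
  omega

-- bodyA expressed through tokA
lemma bodyA_tok (cs : List Char) (i : Int) (st : List Char × List Char × Int) (j : Int) :
    bodyA cs i st j =
      if tokA cs i j = tokA cs i (j + i) then (st.1, tokA cs i j, st.2.2 + 1)
      else (st.1 ++ (if st.2.2 ≠ 1 then PySem.Int.toChars st.2.2 else []) ++ st.2.1,
            tokA cs i (j + i), 1) := by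
  have h2i : j + 2 * i = (j + i) + i := by ring
  simp [bodyA, tokA, h2i]

-- A's final answer extraction from the fold state
def finA (st : List Char × List Char × Int) : Int :=
  ((if st.2.1 ≠ [] then st.1 ++ PySem.Int.toChars st.2.2 ++ st.2.1 else st.1).length : Int)

-- the exact run count B's ceiling division computes for a closed run
lemma floordiv_run {i q r : Int} (hi : 0 < i) (hr : 0 ≤ r) (hri : r < i) :
    PySem.Int.floordiv (q * i + r) i = q := by
  rw [PySem.Int.floordiv_eq_iff_of_pos hi]
  have h1 : (q + 1) * i = q * i + i := by ring
  omega

-- B's zip over [0]+cuts / cuts+[n] is zipSum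
lemma zip_foldl (i n : Int) : ∀ (cuts : List Int) (a t : Int),
    (List.zip (a :: cuts) (cuts ++ [n])).foldl
      (fun t ab => t + contrib i n ab.1 ab.2) t = t + zipSum i n a cuts := by
  intro cuts
  induction cuts with
  | nil => intro a t; simp [zipSum]
  | cons b rest ih =>
    intro a t
    simp only [List.cons_append, List.zip_cons_cons, List.foldl_cons]
    rw [ih b (t + contrib i n a b)]
    simp [zipSum, add_assoc]

-- MAIN: A's loop from chunk start j with run count c (run started at j-(c-1)*i)
-- produces the candidate length that B computes from the cut intervals.
lemma run_eq (cs : List Char) (i : Int) (hi : 0 < i) :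
    ∀ (k : Nat) (j c : Int) (cand : List Char),
    0 ≤ j → j < (cs.length : Int) → i ∣ j → 1 ≤ c →
    (1 < c → i ≤ (cs.length : Int) - j) →
    ((cs.length : Int) - j).toNat ≤ k →
    finA ((PySem.List.pyRange j (cs.length : Int) i).foldl (bodyA cs i)
        (cand, tokA cs i j, c)) =
      (cand.length : Int) + zipSum i (cs.length : Int) (j - (c - 1) * i) (cutsFrom cs i j) := by
  intro k
  induction k with
  | zero => intro j c cand h0 hjn _ _ _ hk; omega
  | succ k ih =>
    intro j c cand h0 hjn hdvd hc hcl hk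
    have hcs0 : (0:Int) ≤ (c - 1) * i := mul_nonneg (by omega) (by omega)
    rw [pyRange_pos_cons hi hjn]
    simp only [List.foldl_cons]
    rw [bodyA_tok]
    have htj := tok_len (cs := cs) hi h0 (le_of_lt hjn)
    by_cases htu : tokA cs i j = tokA cs i (j + i)
    · -- run continues
      rw [if_pos htu]
      dsimp only
      rw [htu]
      have hjin : j + i < (cs.length : Int) := by
        by_contra hge
        exact tok_ne_nil hi h0 hjn (htu.trans (tok_nil hi (by omega) (Int.not_lt.mp hge)))
      have htji := tok_len (cs := cs) hi (show (0:Int) ≤ j + i by omega) (le_of_lt hjin)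
      have hlen : ((tokA cs i j).length : Int) = ((tokA cs i (j + i)).length : Int) := by
        rw [htu]
      have hii : i ≤ (cs.length : Int) - (j + i) := by
        rw [htj, htji] at hlen; omega
      have hcuts : cutsFrom cs i j = cutsFrom cs i (j + i) := by
        rw [cutsFrom, pyRange_pos_cons hi hjin, List.filter_cons]
        have hji : j + i - i = j := by ring
        rw [hji]
        simp [htu, cutsFrom]
      have := ih (j + i) (c + 1) cand (by omega) hjin ⟨j / i + 1, by
          obtain ⟨m, hm⟩ := hdvd; rw [hm]
          rw [Int.mul_ediv_cancel_left _ (by omega : i ≠ 0)]; ring⟩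
        (by omega) (fun _ => hii) (by omega)
      rw [this, hcuts]
      congr 2
      ring
    · -- run ends at j
      rw [if_neg htu]
      dsimp only
      set a := j - (c - 1) * i with ha
      have hdig : (if c ≠ 1 then PySem.Int.toChars c else []) =
          (if c > 1 then PySem.Int.toChars c else []) := by
        by_cases h1 : c = 1
        · simp [h1]
        · rw [if_pos h1, if_pos (by omega)]
      by_cases hjin : j + i < (cs.length : Int)
      · -- another run follows
        have hcuts : cutsFrom cs i j = (j + i) :: cutsFrom cs i (j + i) := by
          rw [cutsFrom, pyRange_pos_cons hi hjin, List.filter_cons]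
          have hji : j + i - i = j := by ring
          rw [hji]
          simp [htu, cutsFrom]
        have hIH := ih (j + i) 1
          (cand ++ (if c ≠ 1 then PySem.Int.toChars c else []) ++ tokA cs i j)
          (by omega) hjin ⟨j / i + 1, by
            obtain ⟨m, hm⟩ := hdvd; rw [hm]
            rw [Int.mul_ediv_cancel_left _ (by omega : i ≠ 0)]; ring⟩
          le_rfl (by omega) (by omega)
        rw [hIH, hcuts]
        have hji1 : j + i - (1 - 1) * i = j + i := by ring
        rw [hji1]
        have hfd : PySem.Int.floordiv (j + i - a + i - 1) i = c := by
          have hx : j + i - a + i - 1 = c * i + (i - 1) := by rw [ha]; ring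
          rw [hx]; exact floordiv_run hi (by omega) (by omega)
        have hcon : contrib i (cs.length : Int) a (j + i) =
            ((if c ≠ 1 then PySem.Int.toChars c else []).length : Int) +
              ((tokA cs i j).length : Int) := by
          rw [contrib, hfd, hdig]
          by_cases h1 : c > 1
          · rw [if_pos h1, if_pos h1]
            have hjl : ((tokA cs i j).length : Int) = i := by
              have := hcl h1; omega
            have hmin : min i ((cs.length : Int) - a) = i := by
              have := hcl h1; rw [ha]; omega
            rw [hjl, hmin]; ring
          · rw [if_neg h1, if_neg h1]
            have hc1 : c = 1 := by omega
            rw [ha, hc1]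
            simp [htj]
        rw [zipSum]
        simp only [List.length_append]
        push_cast
        rw [hcon]
        ring
      · -- this was the last chunk
        replace hjin := Int.not_lt.mp hjin
        rw [pyRange_pos_nil hi hjin]
        simp only [List.foldl_nil]
        have htnil : tokA cs i (j + i) = [] := tok_nil hi (by omega) hjin
        have hcuts : cutsFrom cs i j = [] := by
          rw [cutsFrom, pyRange_pos_nil hi hjin]; rfl
        rw [hcuts, finA, htnil]
        simp only [ne_eq, not_true_eq_false, if_false]
        rw [zipSum]
        have hfd : PySem.Int.floordiv ((cs.length : Int) - a + i - 1) i = c := by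
          have hx : (cs.length : Int) - a + i - 1 = c * i + ((cs.length : Int) - j - 1) := by rw [ha]; ring
          rw [hx]; exact floordiv_run hi (by omega) (by omega)
        have hcon : contrib i (cs.length : Int) a (cs.length : Int) =
            ((if c ≠ 1 then PySem.Int.toChars c else []).length : Int) +
              ((tokA cs i j).length : Int) := by
          rw [contrib, hfd, hdig]
          by_cases h1 : c > 1
          · rw [if_pos h1, if_pos h1]
            have hri : i ≤ (cs.length : Int) - j := hcl h1
            have hjl : ((tokA cs i j).length : Int) = i := by omega
            have hmin : min i ((cs.length : Int) - a) = i := by rw [ha]; omega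
            rw [hjl, hmin]; ring
          · rw [if_neg h1, if_neg h1]
            have hc1 : c = 1 := by omega
            rw [ha, hc1]
            simp [htj]
        simp only [List.length_append]
        push_cast
        rw [hcon]
        ring

-- one chunk size 1 ≤ i, 0 < n: A's candidate length equals B's cut-interval total
lemma inner_eq (cs : List Char) (i : Int) (hi : 0 < i) (hn : 0 < (cs.length : Int)) :
    finA ((PySem.List.pyRange 0 (cs.length : Int) i).foldl (bodyA cs i)
        ([], PySem.List.slice cs (some 0) (some i), 1)) =
      (let cuts := (PySem.List.pyRange i (cs.length : Int) i).filter
          (fun j => decide (PySem.List.slice cs (some (j - i)) (some j) ≠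
                            PySem.List.slice cs (some j) (some (j + i))))
       (List.zip ((0 : Int) :: cuts) (cuts ++ [(cs.length : Int)])).foldl
         (fun t ab => t + contrib i (cs.length : Int) ab.1 ab.2) 0) := by
  have h0 : PySem.List.slice cs (some 0) (some i) = tokA cs i 0 := by
    rw [tokA, zero_add]
  have hcuts : (PySem.List.pyRange i (cs.length : Int) i).filter
      (fun j => decide (PySem.List.slice cs (some (j - i)) (some j) ≠
                        PySem.List.slice cs (some j) (some (j + i)))) = cutsFrom cs i 0 := by
    rw [cutsFrom, zero_add]
    apply List.filter_congr
    intro x _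
    have hx : x - i + i = x := by ring
    simp [tokA, hx]
  rw [h0, hcuts, zip_foldl]
  have := run_eq cs i hi ((cs.length : Int) - 0).toNat 0 1 [] le_rfl hn ⟨0, by ring⟩
    le_rfl (by omega) le_rfl
  rw [this]
  simp

-- ===== VERDICT (by name: the statement is the Claim_ definition above) =====
theorem solution_spec : Claim_equal_solution := by
  intro s _
  unfold Spec_solution solution solution_alt
  simp only []
  apply PySem.List.foldl_congr_mem
  intro acc x hx
  obtain ⟨hx1, hx2⟩ := PySem.List.mem_pyRange_one.mp hx
  have hfd : PySem.Int.floordiv ((s.toList.length : Int)) 2 =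
      (s.toList.length : Int) / 2 := PySem.Int.floordiv_eq_ediv_of_pos (by omega)
  rw [hfd] at hx2
  have hn : 0 < (s.toList.length : Int) := by omega
  exact congrArg (min acc) (inner_eq s.toList x (by omega) hn)
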